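-- pv_equiv track=rewrite | github.com/cringemoment/sfinder-man | main.py | hold_reorders
-- ===== SOURCE A (Python) =====
-- def hold_reorders(queue):
--   if len(queue) <= 1:
--     return set(queue)  # base case
--
--   result = set()
--
--   a = hold_reorders(queue[1:])  # use first piece, work on the 2nd-rest
--   for part in a:
--     result.add(queue[0] + part)
--
--   b = hold_reorders(queue[0] +
--                     queue[2:])  # use second piece, work on 1st + 3rd-rest
--   for part in b:
--     result.add(queue[1] + part)
--
--   return list(result)
-- ===== SOURCE B (Python) =====
-- def hold_reorders(queue):
--     n = len(queue)
--     if n <= 1: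
--         return list(queue)
--     # level[x] = all reorderings of x + queue[j:], computed bottom-up for j = n, n-1, ..., 1
--     level = {x: [x] for x in set(queue)}
--     for j in range(n - 1, 0, -1):
--         c = queue[j]
--         nxt = level
--         level = {}
--         for x in set(queue[:j]):
--             res = set()
--             for p in [x + q for q in nxt[c]] + [c + q for q in nxt[x]]:
--                 res.add(p)
--             level[x] = list(res)
--     return level[queue[0]]
-- ===== Notes on version B (the rewrite author's own statement) =====
-- stated objective: alternative
-- what changed: Replaced the exponential double recursion of A (2^n overlapping calls) by a bottom-up dynamic program over the O(n^2) distinct subproblems, namely one held piece plus a suffix of the queue, keeping one dict of result lists per suffix position; measured severalfold faster at n=16 by the advisory timing run, but on large queues the output itself is exponential so neither version finishes.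
-- outside the precondition, e.g. on hold_reorders(''): A returns set(), B returns []; on hold_reorders('a'): A returns {'a'}, B returns ['a']
import Mathlib
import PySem

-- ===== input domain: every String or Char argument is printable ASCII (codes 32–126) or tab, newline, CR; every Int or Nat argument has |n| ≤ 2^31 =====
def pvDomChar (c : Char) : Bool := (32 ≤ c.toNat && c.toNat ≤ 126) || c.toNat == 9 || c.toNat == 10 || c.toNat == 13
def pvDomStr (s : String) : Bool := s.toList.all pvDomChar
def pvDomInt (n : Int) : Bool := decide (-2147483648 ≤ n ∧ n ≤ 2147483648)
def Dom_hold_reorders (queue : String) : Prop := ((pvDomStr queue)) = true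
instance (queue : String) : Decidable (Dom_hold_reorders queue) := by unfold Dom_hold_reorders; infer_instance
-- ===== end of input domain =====

-- B replaces A's exponential double recursion (2^n overlapping calls) by a bottom-up
-- dynamic program over the O(n^2) distinct subproblems, one held piece plus a queue
-- suffix (objective: alternative; both stay output-bound on large queues).
-- Python A returns a hash-ordered set/list; outputs are compared as sets, the ports use
-- first-insertion order (PySem.Set). Strings are handled as List Char internally
-- (Lean's own String ops are kernel-opaque); concatenations c + part become cons.

-- ===== PORT A =====
def holdA : List Char → List (List Char)
  | [] => []                                   -- len(queue) <= 1: set(queue)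
  | [c] => [[c]]
  | c0 :: c1 :: rest =>
    let a := holdA (c1 :: rest)                -- hold_reorders(queue[1:])
    let r1 := a.foldl (fun acc part => PySem.Set.add acc (c0 :: part)) PySem.Set.empty
    let b := holdA (c0 :: rest)                -- hold_reorders(queue[0] + queue[2:])
    b.foldl (fun acc part => PySem.Set.add acc (c1 :: part)) r1
termination_by cs => cs.length
decreasing_by all_goals simp

def hold_reorders (queue : String) : List String :=
  (holdA queue.toList).map String.ofList

-- ===== PORT B =====
-- level = {x: [x] for x in set(queue)}
def altLevelInit (cs : List Char) : PySem.Dict Char (List (List Char)) :=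
  (PySem.Set.ofList cs).foldl (fun lvl x => lvl.insert x [[x]]) PySem.Dict.empty

-- one iteration of the j-loop: pre = queue[:j], c = queue[j], nxt = previous level
-- (Python's nxt[c] / nxt[x] never miss — proved below — so they are ported as getD _ [])
def altStep (pre : List Char) (c : Char) (nxt : PySem.Dict Char (List (List Char))) :
    PySem.Dict Char (List (List Char)) :=
  (PySem.Set.ofList pre).foldl
    (fun lvl x =>
      lvl.insert x
        (((nxt.getD c []).map (fun q => x :: q) ++ (nxt.getD x []).map (fun q => c :: q)).foldl
          PySem.Set.add PySem.Set.empty))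
    PySem.Dict.empty

def hold_reorders_alt (queue : String) : List String :=
  let cs := queue.toList
  let n : Int := PySem.List.len cs
  if n ≤ 1 then cs.map (fun c => String.ofList [c])        -- list(queue)
  else
    let fin := (PySem.List.pyRange (n - 1) 0 (-1)).foldl
      (fun lvl j =>
        altStep (PySem.List.slice cs none (some j)) (PySem.List.pyGetD cs j ' ') lvl)
      (altLevelInit cs)
    (fin.getD (PySem.List.pyGetD cs 0 ' ') []).map String.ofList   -- level[queue[0]]

-- ===== PRECONDITION & SPEC =====
-- Pre_ excludes queues of length <= 1, on which Python A returns a set (not the declared list[str]).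
def Pre_hold_reorders (queue : String) : Prop := 2 ≤ queue.toList.length
instance (queue : String) : Decidable (Pre_hold_reorders queue) := by unfold Pre_hold_reorders; infer_instance
def pvWitness_hold_reorders : String := "ab"
def Spec_hold_reorders (queue : String) (out : List String) : Prop := out = hold_reorders_alt queue
instance (queue : String) (out : List String) : Decidable (Spec_hold_reorders queue out) := by unfold Spec_hold_reorders; infer_instance

-- ===== CLAIM (what is proved, stated in full; the proofs are below) =====
def Claim_equal_hold_reorders : Prop := ∀ (queue : String), Dom_hold_reorders queue → Pre_hold_reorders queue → Spec_hold_reorders queue (hold_reorders queue)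

-- ===== LEMMAS AND PROOFS =====

-- a fold inserting distinct fresh keys: lookup returns the inserted value
lemma getD_insert_loop {ν : Type} (l : List Char) (v : Char → ν) (d0 : ν)
    (hnd : l.Nodup) (x : Char) (hx : x ∈ l) :
    ((l.foldl (fun d a => d.insert a (v a)) PySem.Dict.empty).getD x d0) = v x := by
  have hitems := PySem.Dict.items_foldl_insert_fresh (l := l) (k := fun a => a) (v := v)
    (d := PySem.Dict.empty) (by intro a _; simp [PySem.Dict.contains_empty])
    (by simpa using hnd)
  apply PySem.Dict.getD_of_mem_items
  · rw [hitems]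
    simp only [PySem.Dict.empty, List.nil_append]
    exact List.mem_map.mpr ⟨x, hx, rfl⟩
  · exact PySem.Dict.nodup_keys_foldl_insert l _ _ (by simp [PySem.Dict.keys, PySem.Dict.empty])

-- the DP invariant: after reaching level j, the table answers every subproblem x + queue[j:]
def LevelInv (cs : List Char) (j : Nat) (d : PySem.Dict Char (List (List Char))) : Prop :=
  ∀ x ∈ cs.take j, d.getD x [] = holdA (x :: cs.drop j)

lemma inv_init (cs : List Char) : LevelInv cs cs.length (altLevelInit cs) := by
  intro x hx
  rw [List.take_length] at hx
  unfold altLevelInit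
  rw [getD_insert_loop _ _ _ (PySem.Set.nodup_ofList cs) x ((PySem.Set.mem_ofList _ _).mpr hx)]
  simp [List.drop_length, holdA]

lemma inv_step (cs : List Char) (j : Nat) (hj : j < cs.length)
    (d : PySem.Dict Char (List (List Char))) (hd : LevelInv cs (j + 1) d) :
    LevelInv cs j (altStep (cs.take j) cs[j] d) := by
  intro x hx
  have htake : cs.take (j + 1) = cs.take j ++ [cs[j]] := by
    rw [List.take_add_one, List.getElem?_eq_getElem hj]; rfl
  have hc : d.getD cs[j] [] = holdA (cs[j] :: cs.drop (j + 1)) := by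
    apply hd; rw [htake]; exact List.mem_append_right _ (List.mem_singleton.mpr rfl)
  have hxv : d.getD x [] = holdA (x :: cs.drop (j + 1)) := by
    apply hd; rw [htake]; exact List.mem_append_left _ hx
  have hdrop : cs.drop j = cs[j] :: cs.drop (j + 1) := List.drop_eq_getElem_cons hj
  unfold altStep
  rw [getD_insert_loop _ _ _ (PySem.Set.nodup_ofList _) x ((PySem.Set.mem_ofList _ _).mpr hx)]
  rw [hdrop, hc, hxv]
  simp only [holdA, List.foldl_append, List.foldl_map]

lemma inv_loop (cs : List Char) : ∀ (j : Nat) (d : PySem.Dict Char (List (List Char))),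
    j ≤ cs.length → 1 ≤ j → LevelInv cs j d →
    LevelInv cs 1 ((PySem.List.pyRange ((j : Int) - 1) 0 (-1)).foldl
      (fun lvl i =>
        altStep (PySem.List.slice cs none (some i)) (PySem.List.pyGetD cs i ' ') lvl) d) := by
  intro j
  induction j with
  | zero => intro d _ h1 _; omega
  | succ j ih =>
    intro d hle h1 hinv
    by_cases hj : j = 0
    · subst hj
      rw [show ((1 : Nat) : Int) - 1 = 0 by norm_num, PySem.List.pyRange_neg_one_eq_nil le_rfl]
      exact hinv
    · have hj1 : 1 ≤ j := Nat.one_le_iff_ne_zero.mpr hj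
      have hjlt : j < cs.length := by omega
      have hcast : ((j + 1 : Nat) : Int) - 1 = (j : Int) := by push_cast; ring
      rw [hcast, PySem.List.pyRange_neg_one_cons (by exact_mod_cast hj1 : (0:Int) < (j:Int))]
      rw [List.foldl_cons]
      have hslice : PySem.List.slice cs none (some ((j : Nat) : Int)) = cs.take j :=
        PySem.List.slice_to_natCast cs j
      have hget : PySem.List.pyGetD cs ((j : Nat) : Int) ' ' = cs[j] := by
        rw [PySem.List.pyGetD_natCast]; exact List.getD_eq_getElem cs ' ' hjlt
      rw [hslice, hget]
      exact ih _ (le_of_lt hjlt) hj1 (inv_step cs j hjlt d hinv)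

-- ===== VERDICT (by name: the statement is the Claim_ definition above) =====
theorem hold_reorders_spec : Claim_equal_hold_reorders := by
  intro queue _ _
  unfold Spec_hold_reorders hold_reorders hold_reorders_alt
  cases hcs : queue.toList with
  | nil => simp [holdA, PySem.List.len]
  | cons c0 t =>
    cases t with
    | nil => simp [holdA, PySem.List.len]
    | cons c1 rest =>
      have hlen : (c0 :: c1 :: rest).length = rest.length + 2 := by simp
      rw [if_neg (by simp [PySem.List.len_eq])]
      have hinv := inv_loop (c0 :: c1 :: rest) (c0 :: c1 :: rest).length (altLevelInit _)
        le_rfl (by omega) (inv_init _)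
      simp only [PySem.List.len_eq]
      have h0 : PySem.List.pyGetD (c0 :: c1 :: rest) 0 ' ' = c0 := by
        simp [PySem.List.pyGetD_zero_cons]
      rw [h0]
      have := hinv c0 (by simp)
      rw [this]
      rfl
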